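-- pv_equiv track=rewrite | github.com/nickbclifford/genitive | xsampa.py | tokenize_xsampa
-- ===== SOURCE A (Python) =====
-- def tokenize_xsampa(xsampa: str) -> list[str]:
--     result = []
--     index = 0
--     length = len(xsampa)
--     while index < length:
--         # search for joint consonants t_s, t_s', t_s\
--         if length - index > 1:
--             if xsampa[index + 1] == "_":
--                 # search for palatalized t_s' or t_s\
--                 if length - index > 3 and xsampa[index + 3] in "'\\":
--                     result.append(xsampa[index : index + 4])
--                     index += 4
--                 # otherwise, extract t_s
--                 else:
--                     result.append(xsampa[index : index + 3])
--                     index += 3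
--             # search for I\, s`, and z`, and all other palatal consonants
--             elif xsampa[index + 1] in "`\\'":
--                 result.append(xsampa[index : index + 2])
--                 index += 2
--
--             # otherwise, just append single consonant/vowel
--             else:
--                 result.append(xsampa[index])
--                 index += 1
--         else:
--             result.append(xsampa[index])
--             index += 1
--
--     return result
-- ===== SOURCE B (Python) =====
-- def tokenize_xsampa(xsampa: str) -> list[str]:
--     # Consume characters from a reversed stack; pattern-match on the next
--     # one or two characters instead of doing index/slice arithmetic.
--     stack = list(reversed(xsampa))
--     tokens = []
--     while stack:
--         c = stack.pop()
--         if stack and stack[-1] == "_":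
--             tok = c + stack.pop()
--             if len(stack) >= 2 and stack[-2] in "'\\":
--                 tok += stack.pop() + stack.pop()
--             elif stack:
--                 tok += stack.pop()
--             tokens.append(tok)
--         elif stack and stack[-1] in "`\\'":
--             tokens.append(c + stack.pop())
--         else:
--             tokens.append(c)
--     return tokens
-- ===== Notes on version B (the rewrite author's own statement) =====
-- stated objective: simpler
-- what changed: Replaces A's manual index arithmetic with length guards and slicing by a stack of remaining characters consumed with direct pattern matching on the next one or two characters (structural recursion in the Lean port).
import Mathlib
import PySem

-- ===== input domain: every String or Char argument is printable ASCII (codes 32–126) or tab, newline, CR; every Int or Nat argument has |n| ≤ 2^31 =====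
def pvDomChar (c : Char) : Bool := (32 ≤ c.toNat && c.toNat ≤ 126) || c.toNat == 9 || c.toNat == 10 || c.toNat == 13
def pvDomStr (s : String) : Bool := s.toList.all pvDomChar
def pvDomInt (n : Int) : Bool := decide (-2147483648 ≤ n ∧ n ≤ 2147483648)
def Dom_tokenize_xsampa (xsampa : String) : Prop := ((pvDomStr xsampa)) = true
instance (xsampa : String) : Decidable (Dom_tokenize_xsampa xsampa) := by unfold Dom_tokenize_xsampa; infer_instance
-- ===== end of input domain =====

-- B replaces A's index/slice arithmetic by pattern matching on the next characters of a
-- stack of remaining characters (objective: simpler; same O(n) cost).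

-- ===== PORT A =====
-- literal port of A's while loop: index advances over the char list, result accumulates
def tokenize_xsampa_go (xsampa : List Char) (index : Nat) (result : List String) : List String :=
  if index < xsampa.length then
    if xsampa.length - index > 1 then
      if PySem.List.pyGetD xsampa ((index + 1 : Nat) : Int) 'A' = '_' then
        if xsampa.length - index > 3 ∧
            (PySem.List.pyGetD xsampa ((index + 3 : Nat) : Int) 'A' = '\'' ∨
             PySem.List.pyGetD xsampa ((index + 3 : Nat) : Int) 'A' = '\\') then
          tokenize_xsampa_go xsampa (index + 4)
            (result ++ [String.ofList (PySem.List.slice xsampa (some ((index : Nat) : Int)) (some ((index + 4 : Nat) : Int)))])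
        else
          tokenize_xsampa_go xsampa (index + 3)
            (result ++ [String.ofList (PySem.List.slice xsampa (some ((index : Nat) : Int)) (some ((index + 3 : Nat) : Int)))])
      else if PySem.List.pyGetD xsampa ((index + 1 : Nat) : Int) 'A' = '`' ∨
              PySem.List.pyGetD xsampa ((index + 1 : Nat) : Int) 'A' = '\\' ∨
              PySem.List.pyGetD xsampa ((index + 1 : Nat) : Int) 'A' = '\'' then
        tokenize_xsampa_go xsampa (index + 2)
          (result ++ [String.ofList (PySem.List.slice xsampa (some ((index : Nat) : Int)) (some ((index + 2 : Nat) : Int)))])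
      else
        tokenize_xsampa_go xsampa (index + 1)
          (result ++ [String.ofList [PySem.List.pyGetD xsampa ((index : Nat) : Int) 'A']])
    else
      tokenize_xsampa_go xsampa (index + 1)
        (result ++ [String.ofList [PySem.List.pyGetD xsampa ((index : Nat) : Int) 'A']])
  else result
termination_by xsampa.length - index

def tokenize_xsampa (xsampa : String) : List String :=
  tokenize_xsampa_go xsampa.toList 0 []

-- ===== PORT B =====
-- port of Source B: the stack of remaining characters is the list; pop = pattern match on head
def tokenize_xsampa_alt_go : List Char → List String
  | [] => []
  | c :: stack =>
    match stack with
    | '_' :: stack2 =>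
      match stack2 with
      | d :: q :: rest =>
        if q = '\'' ∨ q = '\\' then String.ofList [c, '_', d, q] :: tokenize_xsampa_alt_go rest
        else String.ofList [c, '_', d] :: tokenize_xsampa_alt_go (q :: rest)
      | [d] => String.ofList [c, '_', d] :: tokenize_xsampa_alt_go []
      | [] => String.ofList [c, '_'] :: tokenize_xsampa_alt_go []
    | d :: stack2 =>
      if d = '`' ∨ d = '\\' ∨ d = '\'' then String.ofList [c, d] :: tokenize_xsampa_alt_go stack2
      else String.ofList [c] :: tokenize_xsampa_alt_go (d :: stack2)
    | [] => [String.ofList [c]]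

def tokenize_xsampa_alt (xsampa : String) : List String :=
  tokenize_xsampa_alt_go xsampa.toList

-- ===== PRECONDITION & SPEC =====
def Spec_tokenize_xsampa (xsampa : String) (out : List String) : Prop := out = tokenize_xsampa_alt xsampa
instance (xsampa : String) (out : List String) : Decidable (Spec_tokenize_xsampa xsampa out) := by unfold Spec_tokenize_xsampa; infer_instance

-- ===== CLAIM (what is proved, stated in full; the proofs are below) =====
def Claim_equal_tokenize_xsampa : Prop := ∀ (xsampa : String), Dom_tokenize_xsampa xsampa → Spec_tokenize_xsampa xsampa (tokenize_xsampa xsampa)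

-- ===== LEMMAS AND PROOFS =====

-- A's loop from position `index` produces exactly B's tokens of the remaining characters.
theorem tokenize_xsampa_go_eq (n : Nat) :
    ∀ (cs : List Char) (index : Nat) (result : List String), cs.length - index ≤ n →
      tokenize_xsampa_go cs index result = result ++ tokenize_xsampa_alt_go (cs.drop index) := by
  induction n with
  | zero =>
    intro cs index result h
    have hge : ¬ index < cs.length := by omega
    rw [tokenize_xsampa_go]
    simp [hge, List.drop_eq_nil_of_le (by omega : cs.length ≤ index), tokenize_xsampa_alt_go]
  | succ n ih =>
    intro cs index result h
    have hget : ∀ (j : Nat) (d : Char),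
        PySem.List.pyGetD cs ((index + j : Nat) : Int) d = ((cs.drop index)[j]?).getD d := by
      intro j d
      rw [PySem.List.pyGetD_natCast, List.getD_eq_getElem?_getD, List.getElem?_drop]
    have hslice : ∀ k : Nat,
        PySem.List.slice cs (some ((index : Nat) : Int)) (some ((index + k : Nat) : Int))
          = (cs.drop index).take k := by
      intro k; rw [PySem.List.slice_natCast]; congr 1; omega
    have hdrop : ∀ k : Nat, cs.drop (index + k) = (cs.drop index).drop k := by
      intro k; rw [List.drop_drop, Nat.add_comm]
    have hlen : (cs.drop index).length = cs.length - index := List.length_drop ..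
    rcases ht : cs.drop index with _ | ⟨c, t⟩
    · have hge : ¬ index < cs.length := by rw [ht] at hlen; simp at hlen; omega
      rw [tokenize_xsampa_go]
      simp [hge, tokenize_xsampa_alt_go]
    · rw [ht] at hlen
      have hidx : index < cs.length := by simp at hlen; omega
      have hg0 : PySem.List.pyGetD cs ((index : Nat) : Int) 'A' = c := by
        simpa [ht] using hget 0 'A'
      rcases t with _ | ⟨d, t2⟩
      · -- one char left
        have h1 : ¬ cs.length - index > 1 := by simp at hlen; omega
        rw [tokenize_xsampa_go, if_pos hidx, if_neg h1, hg0,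
            ih cs (index + 1) (result ++ [String.ofList [c]]) (by omega),
            hdrop 1, ht]
        simp [tokenize_xsampa_alt_go]
      · -- at least two chars left
        have h1 : cs.length - index > 1 := by simp at hlen; omega
        have hg1 : PySem.List.pyGetD cs ((index + 1 : Nat) : Int) 'A' = d := by
          simpa [ht] using hget 1 'A'
        by_cases hund : d = '_'
        · subst hund
          rcases t2 with _ | ⟨x, t3⟩
          · -- exactly "c_" left
            have h3 : ¬ (cs.length - index > 3 ∧
                (PySem.List.pyGetD cs ((index + 3 : Nat) : Int) 'A' = '\'' ∨
                 PySem.List.pyGetD cs ((index + 3 : Nat) : Int) 'A' = '\\')) := by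
              rintro ⟨h3, -⟩; simp at hlen; omega
            rw [tokenize_xsampa_go, if_pos hidx, if_pos h1, if_pos hg1, if_neg h3,
                ih cs (index + 3) _ (by omega), hdrop 3, hslice 3, ht]
            simp [tokenize_xsampa_alt_go]
          · rcases t3 with _ | ⟨q, t4⟩
            · -- exactly "c_x" left
              have h3 : ¬ (cs.length - index > 3 ∧
                  (PySem.List.pyGetD cs ((index + 3 : Nat) : Int) 'A' = '\'' ∨
                   PySem.List.pyGetD cs ((index + 3 : Nat) : Int) 'A' = '\\')) := by
                rintro ⟨h3, -⟩; simp at hlen; omega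
              rw [tokenize_xsampa_go, if_pos hidx, if_pos h1, if_pos hg1, if_neg h3,
                  ih cs (index + 3) _ (by omega), hdrop 3, hslice 3, ht]
              simp [tokenize_xsampa_alt_go]
            · -- at least four chars: c '_' x q ...
              have hlen4 : cs.length - index > 3 := by simp at hlen; omega
              have hg3 : PySem.List.pyGetD cs ((index + 3 : Nat) : Int) 'A' = q := by
                simpa [ht] using hget 3 'A'
              by_cases hq : q = '\'' ∨ q = '\\'
              · have hcond : cs.length - index > 3 ∧
                    (PySem.List.pyGetD cs ((index + 3 : Nat) : Int) 'A' = '\'' ∨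
                     PySem.List.pyGetD cs ((index + 3 : Nat) : Int) 'A' = '\\') :=
                  ⟨hlen4, by rw [hg3]; exact hq⟩
                rw [tokenize_xsampa_go, if_pos hidx, if_pos h1, if_pos hg1, if_pos hcond,
                    ih cs (index + 4) _ (by omega), hdrop 4, hslice 4, ht]
                simp [tokenize_xsampa_alt_go, hq]
              · have hcond : ¬ (cs.length - index > 3 ∧
                    (PySem.List.pyGetD cs ((index + 3 : Nat) : Int) 'A' = '\'' ∨
                     PySem.List.pyGetD cs ((index + 3 : Nat) : Int) 'A' = '\\')) := by
                  rintro ⟨-, hc⟩; rw [hg3] at hc; exact hq hc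
                rw [tokenize_xsampa_go, if_pos hidx, if_pos h1, if_pos hg1, if_neg hcond,
                    ih cs (index + 3) _ (by omega), hdrop 3, hslice 3, ht]
                simp [tokenize_xsampa_alt_go, hq]
        · -- second char is not '_'
          have hnu : ¬ PySem.List.pyGetD cs ((index + 1 : Nat) : Int) 'A' = '_' := by
            rw [hg1]; exact hund
          by_cases hp : d = '`' ∨ d = '\\' ∨ d = '\''
          · have hcond : PySem.List.pyGetD cs ((index + 1 : Nat) : Int) 'A' = '`' ∨
                PySem.List.pyGetD cs ((index + 1 : Nat) : Int) 'A' = '\\' ∨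
                PySem.List.pyGetD cs ((index + 1 : Nat) : Int) 'A' = '\'' := by
              rw [hg1]; exact hp
            rw [tokenize_xsampa_go, if_pos hidx, if_pos h1, if_neg hnu, if_pos hcond,
                ih cs (index + 2) _ (by omega), hdrop 2, hslice 2, ht]
            rcases hp with h | h | h <;> subst h <;> simp [tokenize_xsampa_alt_go]
          · have hcond : ¬ (PySem.List.pyGetD cs ((index + 1 : Nat) : Int) 'A' = '`' ∨
                PySem.List.pyGetD cs ((index + 1 : Nat) : Int) 'A' = '\\' ∨
                PySem.List.pyGetD cs ((index + 1 : Nat) : Int) 'A' = '\'') := by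
              rw [hg1]; exact hp
            rw [tokenize_xsampa_go, if_pos hidx, if_pos h1, if_neg hnu, if_neg hcond,
                ih cs (index + 1) _ (by omega), hdrop 1, ht, hg0]
            simp [tokenize_xsampa_alt_go, hp]

-- ===== VERDICT (by name: the statement is the Claim_ definition above) =====
theorem tokenize_xsampa_spec : Claim_equal_tokenize_xsampa := by
  intro xsampa _
  unfold Spec_tokenize_xsampa tokenize_xsampa tokenize_xsampa_alt
  simpa using tokenize_xsampa_go_eq (xsampa.toList.length) xsampa.toList 0 [] (by omega)
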